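-- pv_equiv track=rewrite | github.com/Red1-Rahman/CodeAlpha-MusicGenAI | src/preprocess.py | tokens_to_sequences
-- ===== SOURCE A (Python) =====
-- from typing import List, Dict, Tuple
--
-- def tokens_to_sequences(token_lists: List[List[str]], vocab: Dict[str, int], seq_len: int) -> List[List[int]]:
--     unk_id = vocab.get("<PAD>", 0)
--     sequences: List[List[int]] = []
--     for toks in token_lists:
--         ids = [vocab.get(t, unk_id) for t in toks]
--         for start in range(0, len(ids) - seq_len):
--             sequences.append(ids[start : start + seq_len + 1])
--     return sequences
-- ===== SOURCE B (Python) =====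
-- from collections import deque
--
-- def tokens_to_sequences(token_lists, vocab, seq_len):
--     unk_id = vocab.get("<PAD>", 0)
--     window_len = seq_len + 1
--     sequences = []
--     for toks in token_lists:
--         win = deque(maxlen=window_len)
--         for t in toks:
--             win.append(vocab.get(t, unk_id))
--             if len(win) == window_len:
--                 sequences.append(list(win))
--     return sequences
-- ===== Notes on version B (the rewrite author's own statement) =====
-- stated objective: idiomatic
-- what changed: Replaces index-bound computation plus per-window slicing with an incrementally maintained rolling window (collections.deque(maxlen=seq_len+1)), emitting a copy whenever the deque is full.
-- outside the precondition, e.g. on tokens_to_sequences([['a']], {}, -1): A returns [[], []], B returns [[]]; on tokens_to_sequences([['a']], {}, -2): A returns [[], [], []], B raises ValueError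
import Mathlib
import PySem

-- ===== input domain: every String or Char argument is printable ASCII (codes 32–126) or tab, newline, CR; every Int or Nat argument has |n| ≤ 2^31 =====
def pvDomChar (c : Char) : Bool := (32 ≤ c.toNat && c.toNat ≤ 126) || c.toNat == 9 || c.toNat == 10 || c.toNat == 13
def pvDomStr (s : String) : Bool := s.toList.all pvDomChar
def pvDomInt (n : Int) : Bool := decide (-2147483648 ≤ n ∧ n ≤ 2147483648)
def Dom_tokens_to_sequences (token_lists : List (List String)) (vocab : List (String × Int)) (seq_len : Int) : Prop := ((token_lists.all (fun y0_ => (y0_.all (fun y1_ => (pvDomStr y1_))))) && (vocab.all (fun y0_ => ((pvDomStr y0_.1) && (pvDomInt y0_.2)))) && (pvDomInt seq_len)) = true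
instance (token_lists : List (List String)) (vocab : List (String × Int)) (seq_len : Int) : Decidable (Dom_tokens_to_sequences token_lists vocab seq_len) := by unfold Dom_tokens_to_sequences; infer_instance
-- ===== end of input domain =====

-- ===== PORT A =====
-- B replaces A's index-bound/slice window extraction with an incrementally maintained
-- rolling window (deque(maxlen=seq_len+1)); Pre_ restricts to seq_len >= 0 (see comment there).
def tokens_to_sequences (token_lists : List (List String)) (vocab : List (String × Int)) (seq_len : Int) : List (List Int) :=
  let d := PySem.Dict.ofList vocab
  let unk_id := d.getD "<PAD>" 0
  token_lists.foldl (fun sequences toks =>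
    let ids := toks.map (fun t => d.getD t unk_id)
    (PySem.List.pyRange 0 ((ids.length : Int) - seq_len) 1).foldl
      (fun seqs start => seqs ++ [PySem.List.slice ids (some start) (some (start + seq_len + 1))])
      sequences) []

-- ===== PORT B =====
-- win.append(x) on a deque with maxlen winLen: append, then drop from the left if over capacity
def pvPushWin (winLen : Int) (win : List Int) (x : Int) : List Int :=
  let w := win ++ [x]
  if winLen < (w.length : Int) then w.drop 1 else w

-- one step of B's inner loop: push the id, emit a copy of the window when it is full
def pvSlideB (winLen : Int) (st : List (List Int) × List Int) (x : Int) : List (List Int) × List Int :=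
  let win := pvPushWin winLen st.2 x
  if (win.length : Int) = winLen then (st.1 ++ [win], win) else (st.1, win)

def tokens_to_sequences_alt (token_lists : List (List String)) (vocab : List (String × Int)) (seq_len : Int) : List (List Int) :=
  let d := PySem.Dict.ofList vocab
  let unk_id := d.getD "<PAD>" 0
  let winLen := seq_len + 1
  token_lists.foldl (fun sequences toks =>
    (toks.foldl (fun st t => pvSlideB winLen st (d.getD t unk_id)) (sequences, [])).1) []

-- ===== PRECONDITION & SPEC =====
-- Pre_ excludes negative seq_len, on which A still returns (degenerate empty/truncated windows
-- from negative-length slices) but B's deque(maxlen=seq_len+1) either raises (seq_len <= -2)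
-- or yields a different number of empty windows (seq_len = -1); seq_len >= 0 is the natural domain.
def Pre_tokens_to_sequences (token_lists : List (List String)) (vocab : List (String × Int)) (seq_len : Int) : Prop := 0 ≤ seq_len
instance (token_lists : List (List String)) (vocab : List (String × Int)) (seq_len : Int) : Decidable (Pre_tokens_to_sequences token_lists vocab seq_len) := by unfold Pre_tokens_to_sequences; infer_instance

def pvWitness_tokens_to_sequences : List (List String) × (List (String × Int)) × Int :=
  ([["a", "b", "c"], ["a"]], [("a", 1), ("b", 2), ("<PAD>", 0)], 1)

def Spec_tokens_to_sequences (token_lists : List (List String)) (vocab : List (String × Int)) (seq_len : Int) (out : List (List Int)) : Prop := out = tokens_to_sequences_alt token_lists vocab seq_len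
instance (token_lists : List (List String)) (vocab : List (String × Int)) (seq_len : Int) (out : List (List Int)) : Decidable (Spec_tokens_to_sequences token_lists vocab seq_len out) := by unfold Spec_tokens_to_sequences; infer_instance

-- ===== CLAIM (what is proved, stated in full; the proofs are below) =====
def Claim_equal_tokens_to_sequences : Prop := ∀ (token_lists : List (List String)) (vocab : List (String × Int)) (seq_len : Int), Dom_tokens_to_sequences token_lists vocab seq_len → Pre_tokens_to_sequences token_lists vocab seq_len → Spec_tokens_to_sequences token_lists vocab seq_len (tokens_to_sequences token_lists vocab seq_len)

-- ===== LEMMAS AND PROOFS =====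

-- the windows A extracts from ids, in Nat form: all length-L slices
def pvWins (L : Nat) (ids : List Int) : List (List Int) :=
  (List.range (ids.length + 1 - L)).map (fun s => (ids.drop s).take L)

lemma pvWins_snoc (L : Nat) (hL : 1 ≤ L) (p : List Int) (x : Int) :
    pvWins L (p ++ [x]) =
      pvWins L p ++ (if L ≤ p.length + 1 then [(p ++ [x]).drop (p.length + 1 - L)] else []) := by
  unfold pvWins
  by_cases h : L ≤ p.length + 1
  · have h2 : (p ++ [x]).length + 1 - L = (p.length + 1 - L) + 1 := by
      simp only [List.length_append, List.length_cons, List.length_nil]; omega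
    rw [h2, List.range_succ, List.map_append, if_pos h]
    congr 1
    · apply List.map_congr_left; intro s hs; rw [List.mem_range] at hs
      rw [List.drop_append_of_le_length (by omega), List.take_append_of_le_length (by rw [List.length_drop]; omega)]
    · simp only [List.map_cons, List.map_nil]
      rw [List.take_of_length_le (by simp only [List.length_drop, List.length_append, List.length_cons, List.length_nil]; omega)]
  · have h2 : (p ++ [x]).length + 1 - L = 0 := by
      simp only [List.length_append, List.length_cons, List.length_nil]; omega
    have h3 : p.length + 1 - L = 0 := by omega
    rw [h2, h3, if_neg h]; simp

-- invariant of B's inner fold: emitted windows are pvWins, the carried window is the last ≤ L ids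
lemma pvSlideB_foldl (L : Nat) (hL : 1 ≤ L) (ids : List Int) (acc : List (List Int)) :
    ids.foldl (pvSlideB (L : Int)) (acc, []) =
      (acc ++ pvWins L ids, ids.drop (ids.length - L)) := by
  induction ids using List.reverseRecOn with
  | nil => simp [pvWins]; omega
  | append_singleton p x ih =>
    rw [List.foldl_append, ih]
    simp only [List.foldl_cons, List.foldl_nil]
    rw [pvWins_snoc L hL p x]
    unfold pvSlideB pvPushWin
    simp only [List.length_append, List.length_cons, List.length_nil, List.length_drop,
      Nat.zero_add]
    by_cases hc : L ≤ p.length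
    · have hlt : (L : Int) < ((p.length - (p.length - L) + 1 : Nat) : Int) := by
        push_cast; omega
      rw [if_pos hlt]
      have hdrop : (p.drop (p.length - L) ++ [x]).drop 1 = p.drop (p.length + 1 - L) ++ [x] := by
        rw [List.drop_append_of_le_length (by simp; omega), List.drop_drop]
        congr 2; omega
      have hlen : (((p.drop (p.length - L) ++ [x]).drop 1).length : Int) = (L : Int) := by
        simp; omega
      rw [hdrop] at hlen ⊢
      rw [if_pos hlen, if_pos (by omega : L ≤ p.length + 1)]
      have hfull : (p ++ [x]).drop (p.length + 1 - L) = p.drop (p.length + 1 - L) ++ [x] := by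
        rw [List.drop_append_of_le_length (by omega)]
      rw [hfull, List.append_assoc]
    · have hdrop0 : p.length - L = 0 := by omega
      rw [hdrop0, List.drop_zero]
      simp only [Nat.sub_zero]
      rw [if_neg (show ¬ ((L : Int) < ((p.length + 1 : Nat) : Int)) by push_cast; omega)]
      have hfull0 : (p ++ [x]).drop (p.length + 1 - L) = p ++ [x] := by
        rw [show p.length + 1 - L = 0 by omega, List.drop_zero]
      by_cases he : p.length + 1 = L
      · rw [if_pos (show (((p ++ [x]).length : Nat) : Int) = (L : Int) by simp; omega),
           if_pos (by omega : L ≤ p.length + 1), hfull0, List.append_assoc]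
      · rw [if_neg (show ¬ (((p ++ [x]).length : Nat) : Int) = (L : Int) by simp; omega),
           if_neg (by omega : ¬ L ≤ p.length + 1), hfull0]
        simp

-- A's inner range-and-slice loop also produces pvWins
lemma pvA_inner (seq_len : Int) (hs : 0 ≤ seq_len) (ids : List Int) (acc : List (List Int)) :
    (PySem.List.pyRange 0 ((ids.length : Int) - seq_len) 1).foldl
        (fun seqs start => seqs ++ [PySem.List.slice ids (some start) (some (start + seq_len + 1))])
        acc = acc ++ pvWins (seq_len + 1).toNat ids := by
  have hL : (((seq_len + 1).toNat : Nat) : Int) = seq_len + 1 := by omega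
  rw [PySem.List.pyRange_one, List.foldl_map, PySem.List.foldl_append_singleton_eq_map]
  unfold pvWins
  have hm : ((ids.length : Int) - seq_len - 0).toNat = ids.length + 1 - (seq_len + 1).toNat := by
    omega
  rw [hm]
  congr 1
  apply List.map_congr_left; intro s hs; rw [List.mem_range] at hs
  have h1 : (0 : Int) + (s : Int) = ((s : Nat) : Int) := by omega
  rw [h1]
  rw [show ((s : Nat) : Int) + seq_len + 1 = ((s : Nat) : Int) + (((seq_len + 1).toNat : Nat) : Int) by omega]
  rw [PySem.List.slice_natCast_add]

-- ===== VERDICT (by name: the statement is the Claim_ definition above) =====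
theorem tokens_to_sequences_spec : Claim_equal_tokens_to_sequences := by
  intro token_lists vocab seq_len _ hpre
  unfold Spec_tokens_to_sequences tokens_to_sequences tokens_to_sequences_alt
  have hpre' : (0 : Int) ≤ seq_len := hpre
  set d := PySem.Dict.ofList vocab with hd
  set unk := d.getD "<PAD>" 0 with hunk
  set L : Nat := (seq_len + 1).toNat with hLdef
  have hL : ((L : Nat) : Int) = seq_len + 1 := by omega
  suffices h : ∀ (tls : List (List String)) (acc : List (List Int)),
      tls.foldl (fun sequences toks =>
        (PySem.List.pyRange 0 (((toks.map (fun t => d.getD t unk)).length : Int) - seq_len) 1).foldl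
          (fun seqs start => seqs ++ [PySem.List.slice (toks.map (fun t => d.getD t unk)) (some start) (some (start + seq_len + 1))]) sequences) acc =
      tls.foldl (fun sequences toks =>
        (toks.foldl (fun st t => pvSlideB (seq_len + 1) st (d.getD t unk)) (sequences, [])).1) acc by
    exact h token_lists []
  intro tls
  induction tls with
  | nil => intro acc; rfl
  | cons toks rest ih =>
    intro acc
    simp only [List.foldl_cons]
    rw [ih]
    congr 1
    rw [pvA_inner seq_len hpre' (toks.map (fun t => d.getD t unk)) acc]
    have hstep : (fun (st : List (List Int) × List Int) t => pvSlideB (seq_len + 1) st (d.getD t unk)) =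
        (fun st t => pvSlideB ((L : Nat) : Int) st (d.getD t unk)) := by rw [hL]
    rw [hstep, ← List.foldl_map]
    rw [pvSlideB_foldl L (by omega) (toks.map (fun t => d.getD t unk)) acc]
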